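-- pv_equiv track=rewrite | github.com/faaz-world/autosnakes | functions.py | is_snake_collision_up
-- ===== SOURCE A (Python) =====
-- def is_snake_collision_up(mysnake, limit):
--     my_x_pos = int(mysnake[0][0])
--     my_y_pos = int(mysnake[0][1])
--     while my_y_pos > limit:
--         for block in mysnake[1:]:
--             if block[1] == my_y_pos and block[0] == my_x_pos:
--                 return True
--         my_y_pos -= 1
--     return False
-- ===== SOURCE B (Python) =====
-- def is_snake_collision_up(mysnake, limit):
--     head_x = int(mysnake[0][0])
--     head_y = int(mysnake[0][1])
--     return any(block[0] == head_x and limit < block[1] <= head_y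
--                for block in mysnake[1:])
-- ===== Notes on version B (the rewrite author's own statement) =====
-- stated objective: simpler
-- what changed: Replaces the nested while/for loops (rescanning the whole body once per y-level from head_y down to limit) with a single 'any' pass over the body testing x == head_x and limit < y <= head_y.
-- outside the precondition, e.g. on is_snake_collision_up([[0, 0], [0]], 1): A returns False, B raises IndexError
import Mathlib
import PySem

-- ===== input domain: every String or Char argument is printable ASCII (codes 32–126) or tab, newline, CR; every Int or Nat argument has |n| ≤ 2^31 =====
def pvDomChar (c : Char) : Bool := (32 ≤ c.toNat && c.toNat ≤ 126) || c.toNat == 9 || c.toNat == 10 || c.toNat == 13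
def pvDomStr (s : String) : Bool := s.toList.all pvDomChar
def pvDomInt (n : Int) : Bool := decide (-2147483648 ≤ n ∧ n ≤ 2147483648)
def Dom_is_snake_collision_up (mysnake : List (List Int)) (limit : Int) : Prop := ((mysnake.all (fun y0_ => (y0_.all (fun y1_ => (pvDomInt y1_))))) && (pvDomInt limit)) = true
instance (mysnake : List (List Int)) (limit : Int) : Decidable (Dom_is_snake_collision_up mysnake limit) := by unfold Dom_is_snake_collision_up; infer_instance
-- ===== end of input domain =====

-- B replaces A's nested per-y-level rescan of the body with a single 'any' pass over the body (simpler).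

-- ===== PORT A =====
-- block[i] with default 0; inside Pre_ every block has length ≥ 2 so the default is never used
def pvBget (b : List Int) (i : Int) : Int := (PySem.List.pyGet? b i).getD 0

-- the inner 'for block in body: if block[1] == y and block[0] == x: return True'
def pvAScan (body : List (List Int)) (x y : Int) : Bool :=
  match body with
  | [] => false
  | b :: rest =>
    if pvBget b 1 = y then
      if pvBget b 0 = x then true else pvAScan rest x y
    else pvAScan rest x y

-- the outer 'while my_y_pos > limit' loop (my_y_pos decreases each iteration)
def pvALoop (body : List (List Int)) (x y limit : Int) : Bool :=
  if h : y > limit then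
    if pvAScan body x y then true else pvALoop body x (y - 1) limit
  else false
termination_by (y - limit).toNat
decreasing_by omega

def is_snake_collision_up (mysnake : List (List Int)) (limit : Int) : Bool :=
  let my_x_pos := pvBget ((PySem.List.pyGet? mysnake 0).getD []) 0
  let my_y_pos := pvBget ((PySem.List.pyGet? mysnake 0).getD []) 1
  pvALoop (PySem.List.slice mysnake (some 1) none) my_x_pos my_y_pos limit

-- ===== PORT B =====
def is_snake_collision_up_alt (mysnake : List (List Int)) (limit : Int) : Bool :=
  let head_x := pvBget ((PySem.List.pyGet? mysnake 0).getD []) 0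
  let head_y := pvBget ((PySem.List.pyGet? mysnake 0).getD []) 1
  (PySem.List.slice mysnake (some 1) none).any
    (fun block => pvBget block 0 == head_x &&
                  decide (limit < pvBget block 1) && decide (pvBget block 1 ≤ head_y))

-- ===== PRECONDITION & SPEC =====
-- Pre_ excludes the empty snake and snakes containing a block of length < 2: there A raises
-- IndexError whenever such a block's missing coordinate is reached, and on the remaining such
-- inputs (the loop never reaches the short block) B's single pass may itself raise IndexError.
def Pre_is_snake_collision_up (mysnake : List (List Int)) (limit : Int) : Prop :=
  mysnake ≠ [] ∧ ∀ b ∈ mysnake, 2 ≤ b.length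
instance (mysnake : List (List Int)) (limit : Int) : Decidable (Pre_is_snake_collision_up mysnake limit) := by unfold Pre_is_snake_collision_up; infer_instance

def pvWitness_is_snake_collision_up : List (List Int) × Int := ([[2, 3], [2, 1]], 0)

def Spec_is_snake_collision_up (mysnake : List (List Int)) (limit : Int) (out : Bool) : Prop := out = is_snake_collision_up_alt mysnake limit
instance (mysnake : List (List Int)) (limit : Int) (out : Bool) : Decidable (Spec_is_snake_collision_up mysnake limit out) := by unfold Spec_is_snake_collision_up; infer_instance

-- ===== CLAIM (what is proved, stated in full; the proofs are below) =====
def Claim_equal_is_snake_collision_up : Prop := ∀ (mysnake : List (List Int)) (limit : Int), Dom_is_snake_collision_up mysnake limit → Pre_is_snake_collision_up mysnake limit → Spec_is_snake_collision_up mysnake limit (is_snake_collision_up mysnake limit)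

-- ===== LEMMAS AND PROOFS =====

-- the inner scan is an 'any' over the body at the single level y
theorem pvAScan_eq_any (body : List (List Int)) (x y : Int) :
    pvAScan body x y = body.any (fun b => decide (pvBget b 1 = y) && decide (pvBget b 0 = x)) := by
  induction body with
  | nil => rfl
  | cons b rest ih =>
    simp only [pvAScan, List.any_cons, ih]
    by_cases h1 : pvBget b 1 = y <;> by_cases h0 : pvBget b 0 = x <;> simp [h1, h0]

-- distributing 'any' over a pointwise disjunction
theorem any_or_split (xs : List (List Int)) (p q : List Int → Bool) :
    xs.any (fun b => p b || q b) = (xs.any p || xs.any q) := by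
  induction xs with
  | nil => rfl
  | cons b rest ih =>
    simp only [List.any_cons, ih]
    cases p b <;> cases q b <;> cases rest.any p <;> cases rest.any q <;> rfl

-- the while loop is an 'any' over the body with a range test on the y-coordinate
theorem pvALoop_eq_any (body : List (List Int)) (x y limit : Int) :
    pvALoop body x y limit =
      body.any (fun b => decide (pvBget b 0 = x) && decide (limit < pvBget b 1) && decide (pvBget b 1 ≤ y)) := by
  by_cases h : y > limit
  · rw [pvALoop]
    rw [dif_pos h]
    rw [pvAScan_eq_any, pvALoop_eq_any body x (y - 1) limit]
    have hpt : (fun b : List Int => decide (pvBget b 0 = x) && decide (limit < pvBget b 1) && decide (pvBget b 1 ≤ y)) =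
        (fun b : List Int => (decide (pvBget b 1 = y) && decide (pvBget b 0 = x)) ||
         (decide (pvBget b 0 = x) && decide (limit < pvBget b 1) && decide (pvBget b 1 ≤ y - 1))) := by
      funext b
      by_cases h0 : pvBget b 0 = x <;> by_cases h1 : pvBget b 1 = y <;>
        by_cases h2 : limit < pvBget b 1 <;> by_cases h3 : pvBget b 1 ≤ y <;>
        simp [h0, h1, h2, h3] <;> omega
    rw [hpt, any_or_split]
    cases hsc : body.any (fun b => decide (pvBget b 1 = y) && decide (pvBget b 0 = x)) <;> simp
  · rw [pvALoop]
    rw [dif_neg h]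
    symm
    rw [List.any_eq_false]
    intro b _
    simp only [Bool.and_eq_true, decide_eq_true_eq, not_and, and_imp]
    omega
termination_by (y - limit).toNat
decreasing_by omega

-- ===== VERDICT (by name: the statement is the Claim_ definition above) =====
theorem is_snake_collision_up_spec : Claim_equal_is_snake_collision_up := by
  intro mysnake limit _ _
  unfold Spec_is_snake_collision_up is_snake_collision_up is_snake_collision_up_alt
  rw [pvALoop_eq_any]
  refine congrArg _ (funext fun b => ?_)
  by_cases h0 : pvBget b 0 = pvBget ((PySem.List.pyGet? mysnake 0).getD []) 0
  · simp [h0]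
  · simp [h0]
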